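-- pv_equiv track=rewrite | github.com/You-Gao/Blog | scripts/check_quotes.py | check_quotes
-- ===== SOURCE A (Python) =====
-- def check_quotes(lines):
--     QUOTED = 0
--     for line in lines:
--         if line.startswith(">") and "class" not in line:
--             QUOTED = 1
--             continue
--         if QUOTED == 1 and "figcaption" not in line:
--             return False
--         QUOTED = 0
--     return True
-- ===== SOURCE B (Python) =====
-- def check_quotes(lines):
--     def tag(line):
--         if line.startswith(">") and "class" not in line:
--             return "q"
--         if "figcaption" in line:
--             return "f"
--         return "o"
--     return "qo" not in "".join(map(tag, lines))
-- ===== Notes on version B (the rewrite author's own statement) =====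
-- stated objective: alternative
-- what changed: Replaces A's QUOTED flag/continue state machine with a two-stage pipeline: classify every line into a one-character tag ('q' quote, 'f' figcaption, 'o' other), concatenate the tags, and decide the whole check by one substring test "qo" not in the tag string.
import Mathlib
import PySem

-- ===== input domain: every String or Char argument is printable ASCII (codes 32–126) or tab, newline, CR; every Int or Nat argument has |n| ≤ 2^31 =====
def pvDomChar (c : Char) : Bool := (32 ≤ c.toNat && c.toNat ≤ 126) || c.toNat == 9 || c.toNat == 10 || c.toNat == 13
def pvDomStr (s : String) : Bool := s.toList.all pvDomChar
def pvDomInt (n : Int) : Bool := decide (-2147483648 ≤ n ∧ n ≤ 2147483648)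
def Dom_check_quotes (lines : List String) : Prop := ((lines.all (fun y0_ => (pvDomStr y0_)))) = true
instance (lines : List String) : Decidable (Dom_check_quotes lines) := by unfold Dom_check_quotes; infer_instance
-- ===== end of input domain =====

-- B replaces A's QUOTED flag/continue state machine with a staged pipeline: classify every
-- line into a one-character tag, join the tags into a string, and answer with a single
-- substring test '"qo" not in tags' (objective: alternative decomposition, same cost).

-- ===== PORT A =====
def check_quotes_go : List String → Int → Bool
  | [], _ => true
  | line :: rest, quoted =>
    if PySem.Str.startswith line ">" && !(PySem.Str.isIn "class" line) then
      check_quotes_go rest 1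
    else if quoted == 1 && !(PySem.Str.isIn "figcaption" line) then
      false
    else
      check_quotes_go rest 0

def check_quotes (lines : List String) : Bool := check_quotes_go lines 0

-- ===== PORT B =====
def pvTag (line : String) : String :=
  if PySem.Str.startswith line ">" && !(PySem.Str.isIn "class" line) then "q"
  else if PySem.Str.isIn "figcaption" line then "f"
  else "o"

def check_quotes_alt (lines : List String) : Bool :=
  !(PySem.Str.isIn "qo" (PySem.Str.join "" (lines.map pvTag)))

-- ===== PRECONDITION & SPEC =====
def Spec_check_quotes (lines : List String) (out : Bool) : Prop := out = check_quotes_alt lines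
instance (lines : List String) (out : Bool) : Decidable (Spec_check_quotes lines out) := by unfold Spec_check_quotes; infer_instance

-- ===== CLAIM (what is proved, stated in full; the proofs are below) =====
def Claim_equal_check_quotes : Prop := ∀ (lines : List String), Dom_check_quotes lines → Spec_check_quotes lines (check_quotes lines)

-- ===== LEMMAS AND PROOFS =====

-- the one-character classification behind pvTag
def pvTagChar (line : String) : Char :=
  if PySem.Str.startswith line ">" && !(PySem.Str.isIn "class" line) then 'q'
  else if PySem.Str.isIn "figcaption" line then 'f'
  else 'o'

theorem pvTag_toList (line : String) : (pvTag line).toList = [pvTagChar line] := by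
  unfold pvTag pvTagChar
  split_ifs <;> rfl

theorem encoded_toList (lines : List String) :
    (PySem.Str.join "" (lines.map pvTag)).toList = lines.map pvTagChar := by
  have h : (PySem.Str.join "" (lines.map pvTag)).toList
      = PySem.Chars.join "".toList ((lines.map pvTag).map String.toList) := by
    simp [PySem.Str.toList_join]
  rw [h]
  have h2 : (lines.map pvTag).map String.toList
      = (lines.map pvTagChar).map (fun c => [c]) := by
    simp [pvTag_toList]
  rw [h2]
  exact PySem.Chars.join_nil_singletons (lines.map pvTagChar)

theorem go_one (lines : List String) :
    check_quotes_go lines 1 =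
      (match lines with
       | [] => true
       | l :: _ => (!(pvTagChar l == 'o')) && check_quotes_go lines 0) := by
  cases lines with
  | nil => rfl
  | cons l rest =>
    simp only [check_quotes_go, pvTagChar]
    cases hq : PySem.Str.startswith l ">" && !(PySem.Str.isIn "class" l) <;>
      cases hf : PySem.Str.isIn "figcaption" l <;> simp [hq, hf]

theorem singleton_prefix_iff {c : Char} (es : List Char) :
    [c] <+: es ↔ es.head? = some c := by
  cases es with
  | nil => simp
  | cons e es' => simp [List.cons_prefix_cons, eq_comm]

theorem go_zero_iff (lines : List String) :
    check_quotes_go lines 0 = true ↔ ¬ (['q', 'o'] <:+: lines.map pvTagChar) := by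
  induction lines with
  | nil => simp [check_quotes_go]
  | cons l rest ih =>
    simp only [List.map_cons, List.infix_cons_iff]
    by_cases hq : (PySem.Str.startswith l ">" && !(PySem.Str.isIn "class" l)) = true
    · have hc : pvTagChar l = 'q' := by simp only [pvTagChar, if_pos hq]
      have hgo : check_quotes_go (l :: rest) 0 = check_quotes_go rest 1 := by
        simp only [check_quotes_go, if_pos hq]
      rw [hgo, go_one, hc]
      have hpre : (['q', 'o'] <+: 'q' :: rest.map pvTagChar) ↔
          (rest.map pvTagChar).head? = some 'o' := by
        rw [List.cons_prefix_cons]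
        simp [singleton_prefix_iff]
      rw [not_or, ← ih, hpre]
      cases rest with
      | nil => simp [check_quotes_go]
      | cons n rest' =>
        simp only [List.map_cons, List.head?_cons, Bool.and_eq_true,
          Bool.not_eq_eq_eq_not, Bool.not_true, beq_eq_false_iff_ne, ne_eq,
          Option.some_inj]
    · have hc : pvTagChar l ≠ 'q' := by
        simp only [pvTagChar, if_neg hq]
        split_ifs <;> decide
      have hgo : check_quotes_go (l :: rest) 0 = check_quotes_go rest 0 := by
        simp only [check_quotes_go]
        rw [if_neg hq, if_neg (by simp)]
      have hpre : ¬ (['q', 'o'] <+: pvTagChar l :: rest.map pvTagChar) := by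
        rw [List.cons_prefix_cons]
        rintro ⟨h1, -⟩
        exact hc h1.symm
      rw [hgo, ih]
      simp [hpre]

theorem go_zero_eq_alt (lines : List String) :
    check_quotes_go lines 0 = check_quotes_alt lines := by
  unfold check_quotes_alt
  have hqo : "qo".toList = ['q', 'o'] := rfl
  have h : PySem.Str.isIn "qo" (PySem.Str.join "" (lines.map pvTag)) = true ↔
      ['q', 'o'] <:+: lines.map pvTagChar := by
    rw [PySem.Str.isIn_iff_infix, encoded_toList, hqo]
  rw [Bool.eq_iff_iff, go_zero_iff, Bool.not_eq_eq_eq_not, Bool.not_true,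
    ← Bool.not_eq_true, h]

-- ===== VERDICT (by name: the statement is the Claim_ definition above) =====
theorem check_quotes_spec : Claim_equal_check_quotes := by
  intro lines _
  unfold Spec_check_quotes check_quotes
  exact go_zero_eq_alt lines
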